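-- pv_equiv track=rewrite | github.com/phylib/FortniteTraces | Tools/DataExtrapolation/FortniteWorldGeneration.py | get_players_line
-- ===== SOURCE A (Python) =====
-- def get_players_line(player_evolution):
--     players = []
--     current_num = 100
--     player_dict = {}
--     for (t, num) in player_evolution:
--         player_dict[t] = num
--
--     for time in range(0, player_evolution[-1][0]):
--         if time in player_dict:
--             current_num = player_dict[time]
--         players.append((time, current_num))
--     return players
-- ===== SOURCE B (Python) =====
-- def get_players_line(player_evolution):
--     last_t = player_evolution[-1][0]
--     seen = {}
--     for (t, num) in player_evolution:
--         seen[t] = num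
--     events = sorted((t, num) for (t, num) in seen.items() if 0 <= t < last_t)
--     players = []
--     current = 100
--     next_time = 0
--     for (t, num) in events:
--         players.extend((time, current) for time in range(next_time, t))
--         current = num
--         next_time = t
--     players.extend((time, current) for time in range(next_time, last_t))
--     return players
-- ===== Notes on version B (the rewrite author's own statement) =====
-- stated objective: alternative
-- what changed: Instead of probing the last-wins dict at every time step of range(0, last_t), B sorts the deduplicated events that fall in [0, last_t) and fills the gaps between consecutive events with runs of the current player count.
import Mathlib
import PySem

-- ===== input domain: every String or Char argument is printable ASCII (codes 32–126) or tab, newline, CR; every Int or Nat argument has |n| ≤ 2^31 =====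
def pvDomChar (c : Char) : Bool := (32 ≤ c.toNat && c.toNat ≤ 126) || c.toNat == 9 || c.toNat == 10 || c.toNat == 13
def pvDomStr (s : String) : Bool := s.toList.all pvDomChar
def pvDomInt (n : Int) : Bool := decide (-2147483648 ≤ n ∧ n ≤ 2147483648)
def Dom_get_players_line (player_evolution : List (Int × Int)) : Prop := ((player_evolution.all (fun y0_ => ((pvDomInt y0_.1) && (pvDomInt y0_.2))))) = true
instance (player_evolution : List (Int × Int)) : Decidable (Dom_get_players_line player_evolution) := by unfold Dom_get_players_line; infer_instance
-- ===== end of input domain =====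

-- B replaces A's per-time-step dict probe by sorting the deduplicated events and filling runs between them (alternative decomposition, same output).


-- ===== PORT A =====
-- both Pythons build the same last-wins dict with the same loop; shared helper
def pvDictOf (player_evolution : List (Int × Int)) : PySem.Dict Int Int :=
  player_evolution.foldl (fun d p => d.insert p.1 p.2) PySem.Dict.empty

-- loop body of A's 'for time in range(...)': state = (players, current_num)
def pvStepA (d : PySem.Dict Int Int) (st : List (Int × Int) × Int) (time : Int) :
    List (Int × Int) × Int :=
  match d.get? time with
  | some v => (st.1 ++ [(time, v)], v)
  | none => (st.1 ++ [(time, st.2)], st.2)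

def get_players_line (player_evolution : List (Int × Int)) : List (Int × Int) :=
  match PySem.List.pyGet? player_evolution (-1) with
  | none => []   -- IndexError in Python; excluded by Pre_
  | some last =>
    ((PySem.List.pyRange 0 last.1 1).foldl (pvStepA (pvDictOf player_evolution)) ([], 100)).1

-- ===== PORT B =====
-- loop body of B's 'for (t, num) in events': state = (players, current, next_time)
def pvStepB (st : List (Int × Int) × Int × Int) (ev : Int × Int) :
    List (Int × Int) × Int × Int :=
  (st.1 ++ (PySem.List.pyRange st.2.2 ev.1 1).map (fun time => (time, st.2.1)), ev.2, ev.1)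

def get_players_line_alt (player_evolution : List (Int × Int)) : List (Int × Int) :=
  match PySem.List.pyGet? player_evolution (-1) with
  | none => []   -- IndexError in Python; excluded by Pre_
  | some last =>
    let last_t := last.1
    let events := PySem.List.sorted
      ((pvDictOf player_evolution).items.filter
        (fun p => decide (0 ≤ p.1) && decide (p.1 < last_t)))
      (fun e => e.1) false
    let st := events.foldl pvStepB ([], 100, 0)
    st.1 ++ (PySem.List.pyRange st.2.2 last_t 1).map (fun time => (time, st.2.1))

-- ===== PRECONDITION & SPEC =====
-- Pre_ excludes only the empty list, on which A raises IndexError at player_evolution[-1].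
def Pre_get_players_line (player_evolution : List (Int × Int)) : Prop :=
  player_evolution ≠ []
instance (player_evolution : List (Int × Int)) : Decidable (Pre_get_players_line player_evolution) := by unfold Pre_get_players_line; infer_instance

def pvWitness_get_players_line : (List (Int × Int)) := [(1, 95), (3, 90), (4, 80)]

def Spec_get_players_line (player_evolution : List (Int × Int)) (out : List (Int × Int)) : Prop := out = get_players_line_alt player_evolution
instance (player_evolution : List (Int × Int)) (out : List (Int × Int)) : Decidable (Spec_get_players_line player_evolution out) := by unfold Spec_get_players_line; infer_instance

-- ===== CLAIM (what is proved, stated in full; the proofs are below) =====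
def Claim_equal_get_players_line : Prop := ∀ (player_evolution : List (Int × Int)), Dom_get_players_line player_evolution → Pre_get_players_line player_evolution → Spec_get_players_line player_evolution (get_players_line player_evolution)

-- ===== LEMMAS AND PROOFS =====

-- B's walk starting at fill index a with current value c, final bound n
def pvBWalk (evs : List (Int × Int)) (c a n : Int) : List (Int × Int) :=
  let st := evs.foldl pvStepB ([], c, a)
  st.1 ++ (PySem.List.pyRange st.2.2 n 1).map (fun time => (time, st.2.1))

-- accumulator generalization for A's loop
theorem pvStepA_acc (d : PySem.Dict Int Int) (l : List Int) :
    ∀ (acc : List (Int × Int)) (c : Int),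
      l.foldl (pvStepA d) (acc, c)
        = (acc ++ (l.foldl (pvStepA d) ([], c)).1, (l.foldl (pvStepA d) ([], c)).2) := by
  induction l with
  | nil => intro acc c; simp
  | cons x t ih =>
    intro acc c
    simp only [List.foldl_cons]
    cases h : d.get? x with
    | some v =>
        simp only [pvStepA, h]
        rw [ih (acc ++ [(x, v)]) v, ih ([] ++ [(x, v)]) v]
        simp
    | none =>
        simp only [pvStepA, h]
        rw [ih (acc ++ [(x, c)]) c, ih ([] ++ [(x, c)]) c]
        simp

-- accumulator generalization for B's loop
theorem pvStepB_acc (evs : List (Int × Int)) :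
    ∀ (acc : List (Int × Int)) (c a : Int),
      evs.foldl pvStepB (acc, c, a)
        = (acc ++ (evs.foldl pvStepB ([], c, a)).1, (evs.foldl pvStepB ([], c, a)).2) := by
  induction evs with
  | nil => intro acc c a; simp
  | cons e t ih =>
    intro acc c a
    simp only [List.foldl_cons, pvStepB]
    rw [ih (acc ++ _) e.2 e.1, ih ([] ++ (PySem.List.pyRange a e.1 1).map _) e.2 e.1]
    simp

-- A's loop over a dict-free stretch just copies the current value
theorem pvGapA (d : PySem.Dict Int Int) (c : Int) :
    ∀ (a b : Int), (∀ t, a ≤ t → t < b → d.get? t = none) →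
      (PySem.List.pyRange a b 1).foldl (pvStepA d) ([], c)
        = ((PySem.List.pyRange a b 1).map (fun t => (t, c)), c) := by
  intro a b
  by_cases hab : b ≤ a
  · intro _; rw [PySem.List.pyRange_one_eq_nil hab]; simp
  · rw [not_le] at hab
    have hk : ∀ (k : Nat) (a : Int), (b - a).toNat = k →
        (∀ t, a ≤ t → t < b → d.get? t = none) →
        (PySem.List.pyRange a b 1).foldl (pvStepA d) ([], c)
          = ((PySem.List.pyRange a b 1).map (fun t => (t, c)), c) := by
      intro k
      induction k with
      | zero =>
        intro a hk _
        rw [PySem.List.pyRange_one_eq_nil (by omega)]; simp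
      | succ m ih =>
        intro a hk hnone
        have hab' : a < b := by omega
        rw [PySem.List.pyRange_one_cons hab']
        simp only [List.foldl_cons, List.map_cons]
        rw [show pvStepA d ([], c) a = ([(a, c)], c) by
          simp [pvStepA, hnone a le_rfl hab']]
        rw [pvStepA_acc, ih (a + 1) (by omega) (fun t h1 h2 => hnone t (by omega) h2)]
        simp
    exact hk (b - a).toNat a rfl
  
-- B's walk recurrence at a cons
theorem pvBWalk_cons (s w : Int) (rest : List (Int × Int)) (c a n : Int) :
    pvBWalk ((s, w) :: rest) c a n
      = (PySem.List.pyRange a s 1).map (fun t => (t, c)) ++ pvBWalk rest w s n := by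
  simp only [pvBWalk, List.foldl_cons, pvStepB]
  rw [pvStepB_acc]
  simp

-- shifting B's fill start by one when all events lie strictly beyond it
theorem pvBWalk_shift (evs : List (Int × Int)) (c t n : Int) (htn : t < n)
    (h : ∀ p ∈ evs, t < p.1) :
    pvBWalk evs c t n = (t, c) :: pvBWalk evs c (t + 1) n := by
  cases evs with
  | nil =>
    simp only [pvBWalk, List.foldl_nil]
    rw [PySem.List.pyRange_one_cons htn]
    simp
  | cons e rest =>
    obtain ⟨s, w⟩ := e
    have hts : t < s := h (s, w) (by simp)
    rw [pvBWalk_cons, pvBWalk_cons, PySem.List.pyRange_one_cons hts]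
    simp

-- main invariant: A's scan over [a, n) equals B's walk over the sorted events of that window
theorem pvMain (d : PySem.Dict Int Int) (n : Int) :
    ∀ (evs : List (Int × Int)), evs.Pairwise (fun p q => p.1 < q.1) →
    ∀ (a c : Int), (∀ t v, ((t, v) ∈ evs) ↔ (d.get? t = some v ∧ a ≤ t ∧ t < n)) →
      ((PySem.List.pyRange a n 1).foldl (pvStepA d) ([], c)).1 = pvBWalk evs c a n := by
  intro evs
  induction evs with
  | nil =>
    intro _ a c hmem
    have hnone : ∀ t, a ≤ t → t < n → d.get? t = none := by
      intro t h1 h2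
      cases hg : d.get? t with
      | none => rfl
      | some v => exact absurd ((hmem t v).mpr ⟨hg, h1, h2⟩) (by simp)
    rw [pvGapA d c a n hnone]
    simp [pvBWalk]
  | cons e rest ih =>
    intro hpw a c hmem
    obtain ⟨t, v⟩ := e
    have hpw' : rest.Pairwise (fun p q => p.1 < q.1) := hpw.of_cons
    have hrest_gt : ∀ p ∈ rest, t < p.1 := by
      intro p hp; exact List.rel_of_pairwise_cons hpw hp
    obtain ⟨hget, hat, htn⟩ := (hmem t v).mp (by simp)
    -- no dict key in [a, t)
    have hnone : ∀ s, a ≤ s → s < t → d.get? s = none := by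
      intro s h1 h2
      cases hg : d.get? s with
      | none => rfl
      | some w =>
        have := (hmem s w).mpr ⟨hg, h1, by omega⟩
        rcases List.mem_cons.mp this with heq | hmemr
        · exact absurd (congrArg Prod.fst heq) (by simp; omega)
        · exact absurd (hrest_gt (s, w) hmemr) (by simp; omega)
    -- membership for rest over window [t+1, n)
    have hmem' : ∀ s w, ((s, w) ∈ rest) ↔ (d.get? s = some w ∧ t + 1 ≤ s ∧ s < n) := by
      intro s w
      constructor
      · intro hr
        obtain ⟨hg, _, hn⟩ := (hmem s w).mp (List.mem_cons_of_mem _ hr)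
        exact ⟨hg, by have := hrest_gt (s, w) hr; simp at this; omega, hn⟩
      · intro ⟨hg, h1, h2⟩
        have := (hmem s w).mpr ⟨hg, by omega, h2⟩
        rcases List.mem_cons.mp this with heq | hmemr
        · exfalso; have := congrArg Prod.fst heq; simp at this; omega
        · exact hmemr
    -- split the range at t
    rw [PySem.List.pyRange_one_append a t n hat (by omega), List.foldl_append]
    rw [pvGapA d c a t hnone]
    rw [pvStepA_acc]
    rw [PySem.List.pyRange_one_cons htn]
    simp only [List.foldl_cons]
    rw [show pvStepA d ([], c) t = ([(t, v)], v) by simp [pvStepA, hget]]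
    rw [pvStepA_acc]
    rw [pvBWalk_cons, pvBWalk_shift rest v t n htn hrest_gt]
    rw [ih hpw' (t + 1) v hmem']
    simp

-- pairwise ≤ on an injective-on-the-list key upgrades to pairwise <
theorem pvPairwiseLt (l : List (Int × Int)) (hnd : (l.map Prod.fst).Nodup)
    (hle : l.Pairwise (fun p q => p.1 ≤ q.1)) : l.Pairwise (fun p q => p.1 < q.1) := by
  have hne : l.Pairwise (fun p q => p.1 ≠ q.1) := (List.pairwise_map.mp hnd)
  exact (hle.and hne).imp (fun ⟨h1, h2⟩ => lt_of_le_of_ne h1 h2)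

-- the built dict has nodup keys
theorem pvNodupKeys (pe : List (Int × Int)) : (pvDictOf pe).keys.Nodup := by
  unfold pvDictOf
  exact PySem.Dict.nodup_keys_foldl_insert_key pe Prod.fst (fun d p => p.2)
    PySem.Dict.empty PySem.Dict.nodup_keys_empty

-- ===== VERDICT (by name: the statement is the Claim_ definition above) =====
theorem get_players_line_spec : Claim_equal_get_players_line := by
  intro pe _ hpre
  unfold Spec_get_players_line get_players_line get_players_line_alt
  cases hlast : PySem.List.pyGet? pe (-1) with
  | none => rfl
  | some last =>
    set d := pvDictOf pe with hd
    set n := last.1 with hn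
    set fl := d.items.filter (fun p => decide (0 ≤ p.1) && decide (p.1 < n)) with hfl
    set evs := PySem.List.sorted fl (fun e => e.1) false with hevs
    have hndk : d.keys.Nodup := pvNodupKeys pe
    have hnditems : (d.items.map Prod.fst).Nodup := hndk
    have hndfl : (fl.map Prod.fst).Nodup :=
      (List.filter_sublist.map Prod.fst).nodup hnditems
    have hperm : evs.Perm fl := PySem.List.sorted_perm fl (fun e => e.1) false
    have hndevs : (evs.map Prod.fst).Nodup := ((hperm.map Prod.fst).nodup_iff).mpr hndfl
    have hpwle : evs.Pairwise (fun p q => p.1 ≤ q.1) :=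
      PySem.List.sorted_pairwise fl (fun e => e.1)
    have hpw : evs.Pairwise (fun p q => p.1 < q.1) := pvPairwiseLt evs hndevs hpwle
    have hmem : ∀ t v, ((t, v) ∈ evs) ↔ (d.get? t = some v ∧ 0 ≤ t ∧ t < n) := by
      intro t v
      rw [List.Perm.mem_iff hperm, hfl, List.mem_filter]
      rw [← PySem.Dict.get?_eq_some_iff_mem_items d t v hndk]
      simp
    exact pvMain d n evs hpw 0 100 hmem
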